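-- pv_equiv track=rewrite | github.com/shivsharcode/Python-Training | temporary/CodeVita/1.py | costCalculator
-- ===== SOURCE A (Python) =====
-- def costCalculator(s, a, b):
--     i = 0
--     # j = 1
--
--     freq01, freq10 = 0, 0
--
--     while i < len(s) - 1:
--         if s[i] + s[i + 1] == '01':
--             freq01 += 1
--         elif s[i] + s[i + 1] == '10':
--             freq10 += 1
--         i += 1
--
--     totalCost = a * freq01 + b * freq10
--     return totalCost
-- ===== SOURCE B (Python) =====
-- def costCalculator(s, a, b):
--     # Run-length decomposition: collapse maximal equal-character runs to their
--     # keys, then each consecutive key pair is exactly one adjacent differing pair.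
--     keys = []
--     for c in s:
--         if not keys or keys[-1] != c:
--             keys.append(c)
--     freq01 = freq10 = 0
--     for prev, cur in zip(keys, keys[1:]):
--         if prev == '0' and cur == '1':
--             freq01 += 1
--         elif prev == '1' and cur == '0':
--             freq10 += 1
--     return a * freq01 + b * freq10
-- ===== Notes on version B (the rewrite author's own statement) =====
-- stated objective: alternative
-- what changed: B first collapses the string into the sequence of maximal-run keys and then counts 0->1 / 1->0 run boundaries over that (usually much shorter) key list, instead of A's index scan that builds and compares a two-character string at every adjacent position.
import Mathlib
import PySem

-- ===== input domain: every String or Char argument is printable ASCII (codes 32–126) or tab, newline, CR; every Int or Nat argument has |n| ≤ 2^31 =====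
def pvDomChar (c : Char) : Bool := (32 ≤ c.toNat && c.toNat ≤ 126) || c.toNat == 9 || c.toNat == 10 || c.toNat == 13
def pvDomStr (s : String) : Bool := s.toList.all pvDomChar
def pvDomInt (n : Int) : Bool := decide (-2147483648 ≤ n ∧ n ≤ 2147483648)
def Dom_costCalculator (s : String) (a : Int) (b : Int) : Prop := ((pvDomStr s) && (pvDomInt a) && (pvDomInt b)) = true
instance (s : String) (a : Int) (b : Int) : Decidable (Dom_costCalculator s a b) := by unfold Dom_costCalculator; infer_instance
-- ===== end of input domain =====

-- B collapses the string into maximal-run keys and counts 0→1 / 1→0 run boundaries,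
-- instead of A's single index scan over every adjacent character pair; same result, alternative decomposition.


-- ===== PORT A =====
-- the while loop over i with state (freq01, freq10), as the obvious structural recursion over the
-- remaining suffix (position i ↦ suffix starting at i); s[i] + s[i+1] built and compared as a string
def costCalcLoopA : List Char → Int → Int → Int × Int
  | x :: y :: t, f01, f10 =>
    let pair := String.ofList [x, y]
    if pair = "01" then costCalcLoopA (y :: t) (f01 + 1) f10
    else if pair = "10" then costCalcLoopA (y :: t) f01 (f10 + 1)
    else costCalcLoopA (y :: t) f01 f10
  | _, f01, f10 => (f01, f10)

def costCalculator (s : String) (a : Int) (b : Int) : Int :=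
  let r := costCalcLoopA s.toList 0 0
  a * r.1 + b * r.2

-- ===== PORT B =====
-- first loop of B: build the list of maximal-run keys (append a char iff it differs from the last key)
def costCalcKeyStep (ks : List Char) (c : Char) : List Char :=
  if ks = [] ∨ ks.getLast? ≠ some c then ks ++ [c] else ks

-- second loop of B: scan consecutive key pairs
def costCalcPairStep (acc : Int × Int) (p : Char × Char) : Int × Int :=
  if p.1 = '0' ∧ p.2 = '1' then (acc.1 + 1, acc.2)
  else if p.1 = '1' ∧ p.2 = '0' then (acc.1, acc.2 + 1)
  else acc

def costCalculator_alt (s : String) (a : Int) (b : Int) : Int :=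
  let keys := s.toList.foldl costCalcKeyStep []
  let r := (keys.zip keys.tail).foldl costCalcPairStep (0, 0)
  a * r.1 + b * r.2

-- ===== PRECONDITION & SPEC =====
def Spec_costCalculator (s : String) (a : Int) (b : Int) (out : Int) : Prop := out = costCalculator_alt s a b
instance (s : String) (a : Int) (b : Int) (out : Int) : Decidable (Spec_costCalculator s a b out) := by unfold Spec_costCalculator; infer_instance

-- ===== CLAIM (what is proved, stated in full; the proofs are below) =====
def Claim_equal_costCalculator : Prop := ∀ (s : String) (a : Int) (b : Int), Dom_costCalculator s a b → Spec_costCalculator s a b (costCalculator s a b)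

-- ===== LEMMAS AND PROOFS =====

-- reference count of adjacent ('0','1') and ('1','0') pairs in a list
def countAB : List Char → Int × Int
  | x :: y :: t =>
    let r := countAB (y :: t)
    ((if x = '0' ∧ y = '1' then 1 else 0) + r.1, (if x = '1' ∧ y = '0' then 1 else 0) + r.2)
  | _ => (0, 0)

-- collapse with a "previous key" state, structural counterpart of B's first loop
def collapseFrom : Option Char → List Char → List Char
  | _, [] => []
  | p, c :: t => if p = some c then collapseFrom p t else c :: collapseFrom (some c) t

theorem pairEq01 (x y : Char) : (String.ofList [x, y] = "01") ↔ (x = '0' ∧ y = '1') := by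
  rw [show ("01" : String) = String.ofList ['0', '1'] from rfl, String.ofList_inj]
  simp

theorem pairEq10 (x y : Char) : (String.ofList [x, y] = "10") ↔ (x = '1' ∧ y = '0') := by
  rw [show ("10" : String) = String.ofList ['1', '0'] from rfl, String.ofList_inj]
  simp

-- A's loop computes countAB of its suffix
theorem loopA_eq (cs : List Char) (f01 f10 : Int) :
    costCalcLoopA cs f01 f10 = (f01 + (countAB cs).1, f10 + (countAB cs).2) := by
  match cs with
  | [] => simp [costCalcLoopA, countAB]
  | [x] => simp [costCalcLoopA, countAB]
  | x :: y :: t =>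
    rw [costCalcLoopA]
    by_cases h01 : x = '0' ∧ y = '1'
    · rw [if_pos ((pairEq01 _ _).2 h01), loopA_eq (y :: t)]
      simp only [countAB, h01]
      refine Prod.ext ?_ ?_ <;> simp <;> ring
    · rw [if_neg (fun hc => h01 ((pairEq01 _ _).1 hc))]
      by_cases h10 : x = '1' ∧ y = '0'
      · rw [if_pos ((pairEq10 _ _).2 h10), loopA_eq (y :: t)]
        simp only [countAB, h10]
        refine Prod.ext ?_ ?_ <;> simp <;> ring
      · rw [if_neg (fun hc => h10 ((pairEq10 _ _).1 hc)), loopA_eq (y :: t)]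
        simp only [countAB, h01, h10]
        refine Prod.ext ?_ ?_ <;> simp

-- B's first loop equals collapseFrom of the last key
theorem foldl_keyStep (cs : List Char) (ks : List Char) :
    cs.foldl costCalcKeyStep ks = ks ++ collapseFrom ks.getLast? cs := by
  induction cs generalizing ks with
  | nil => simp [collapseFrom]
  | cons c t ih =>
    simp only [List.foldl_cons]
    by_cases h : ks = [] ∨ ks.getLast? ≠ some c
    · have hstep : costCalcKeyStep ks c = ks ++ [c] := by simp [costCalcKeyStep, h]
      rw [hstep, ih]
      have hlast : (ks ++ [c]).getLast? = some c := by simp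
      rw [hlast]
      have hcf : collapseFrom ks.getLast? (c :: t) = c :: collapseFrom (some c) t := by
        rcases h with h | h
        · subst h; simp [collapseFrom]
        · simp [collapseFrom, h]
      rw [hcf]; simp
    · rw [not_or] at h
      have hne : ks ≠ [] := h.1
      have hlast : ks.getLast? = some c := not_not.mp h.2
      have hstep : costCalcKeyStep ks c = ks := by simp [costCalcKeyStep, hne, hlast]
      rw [hstep, ih, hlast]
      simp [collapseFrom]

-- collapsing runs preserves the adjacent 01/10 counts
theorem countAB_collapse_cons (t : List Char) (c : Char) :
    countAB (c :: collapseFrom (some c) t) = countAB (c :: t) := by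
  induction t generalizing c with
  | nil => rfl
  | cons d t' ih =>
    by_cases h : d = c
    · subst h
      have : collapseFrom (some d) (d :: t') = collapseFrom (some d) t' := by
        simp [collapseFrom]
      rw [this, ih]
      have hnot01 : ¬ (d = '0' ∧ d = '1') := by rintro ⟨rfl, h⟩; simp at h
      have hnot10 : ¬ (d = '1' ∧ d = '0') := by rintro ⟨rfl, h⟩; simp at h
      simp [countAB, hnot01, hnot10]
    · have h' : ¬ c = d := fun hc => h hc.symm
      have : collapseFrom (some c) (d :: t') = d :: collapseFrom (some d) t' := by
        simp [collapseFrom, h']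
      rw [this]
      have ih' := ih d
      simp only [countAB]
      rw [ih']
    
theorem countAB_collapse (cs : List Char) :
    countAB (collapseFrom none cs) = countAB cs := by
  cases cs with
  | nil => rfl
  | cons c t =>
    have : collapseFrom none (c :: t) = c :: collapseFrom (some c) t := by
      simp [collapseFrom]
    rw [this, countAB_collapse_cons]

-- B's second loop computes countAB of the key list
theorem foldl_pairStep (l : List Char) (f g : Int) :
    (l.zip l.tail).foldl costCalcPairStep (f, g) = (f + (countAB l).1, g + (countAB l).2) := by
  match l with
  | [] => simp [countAB]
  | [x] => simp [countAB]
  | x :: y :: t =>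
    have hz : ((x :: y :: t).zip (x :: y :: t).tail) = (x, y) :: ((y :: t).zip t) := by simp
    rw [hz]
    simp only [List.foldl_cons]
    by_cases h01 : x = '0' ∧ y = '1'
    · have hstep : costCalcPairStep (f, g) (x, y) = (f + 1, g) := by simp [costCalcPairStep, h01]
      rw [hstep]
      have := foldl_pairStep (y :: t) (f + 1) g
      simp only [List.tail_cons] at this
      rw [this]
      simp [countAB, h01]
      ring
    · by_cases h10 : x = '1' ∧ y = '0'
      · have hstep : costCalcPairStep (f, g) (x, y) = (f, g + 1) := by
          simp [costCalcPairStep, h01, h10]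
        rw [hstep]
        have := foldl_pairStep (y :: t) f (g + 1)
        simp only [List.tail_cons] at this
        rw [this]
        simp [countAB, h01, h10]
        ring
      · have hstep : costCalcPairStep (f, g) (x, y) = (f, g) := by
          simp [costCalcPairStep, h01, h10]
        rw [hstep]
        have := foldl_pairStep (y :: t) f g
        simp only [List.tail_cons] at this
        rw [this]
        simp [countAB, h01, h10]

-- ===== VERDICT (by name: the statement is the Claim_ definition above) =====
theorem costCalculator_spec : Claim_equal_costCalculator := by
  intro s a b _
  unfold Spec_costCalculator costCalculator costCalculator_alt
  simp only [loopA_eq, foldl_keyStep, foldl_pairStep, List.nil_append, List.getLast?_nil,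
    countAB_collapse]
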